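-- pv_equiv track=rewrite | github.com/kimmokalover/Linear-Algebra | bidiagonal_matrix.py | u_bidiag
-- ===== SOURCE A (Python) =====
-- def u_bidiag(A):
--     n = len(A)
--     p = len(A[0])
--     ret = []
--
--     for i in range(n):
--         ret.append([])
--         for j in range(p):
--             if(i == j):
--                 ret[i].append(A[i][j])
--             elif (i + 1 == j):
--                 ret[i].append(A[i][j])
--             else :
--                 ret[i].append(0)
--     return ret
-- ===== SOURCE B (Python) =====
-- def u_bidiag(A):
--     p = len(A[0])
--     ret = []
--     for i, row in enumerate(A):
--         if i >= p:
--             ret.append([0] * p)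
--         else:
--             seg = row[i:i + 2][:p - i]
--             ret.append([0] * i + seg + [0] * (p - i - len(seg)))
--     return ret
-- ===== Notes on version B (the rewrite author's own statement) =====
-- stated objective: alternative
-- what changed: B has no per-cell column loop: it builds each row by slicing the (at most two) bidiagonal entries out of the source row and concatenating them between two zero-padding blocks, iterating rows with enumerate.
import Mathlib
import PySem

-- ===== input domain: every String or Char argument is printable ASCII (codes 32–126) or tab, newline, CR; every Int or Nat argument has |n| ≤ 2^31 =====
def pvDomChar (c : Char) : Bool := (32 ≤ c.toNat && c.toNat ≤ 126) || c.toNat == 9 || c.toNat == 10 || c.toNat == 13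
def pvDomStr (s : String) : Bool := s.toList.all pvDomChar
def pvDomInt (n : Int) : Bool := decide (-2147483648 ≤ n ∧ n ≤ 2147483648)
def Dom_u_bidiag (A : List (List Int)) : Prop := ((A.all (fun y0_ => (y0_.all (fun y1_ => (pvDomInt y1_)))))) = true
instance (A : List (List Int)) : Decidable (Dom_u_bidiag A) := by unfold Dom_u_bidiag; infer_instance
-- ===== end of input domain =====

-- B builds each row by slicing the bidiagonal entries out of the source row and concatenating
-- zero padding around them (no per-cell column loop); objective: alternative (same cost).

-- ===== PORT A =====
-- per-cell branch over range n × range p; indexing via getD is exact under Pre_ (in-range accesses)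
def u_bidiag (A : List (List Int)) : List (List Int) :=
  let n := A.length
  let p := (A.headD []).length
  (List.range n).map (fun i =>
    (List.range p).map (fun j =>
      if i = j then (A.getD i []).getD j 0
      else if i + 1 = j then (A.getD i []).getD j 0
      else 0))

-- ===== PORT B =====
-- for i, row in enumerate(A): zeros, or [0]*i + row[i:i+2][:p-i] + [0]*(p-i-len(seg))
def u_bidiag_alt (A : List (List Int)) : List (List Int) :=
  let p := (A.headD []).length
  (PySem.List.enumerate A 0).map (fun ir =>
    let i := ir.1
    let row := ir.2
    if (p : Int) ≤ i then List.replicate p (0 : Int)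
    else
      let seg := PySem.List.slice (PySem.List.slice row (some i) (some (i + 2))) none
        (some ((p : Int) - i))
      List.replicate i.toNat (0 : Int) ++ seg ++ List.replicate (p - i.toNat - seg.length) 0)

-- ===== PRECONDITION & SPEC =====
-- Pre_ excludes exactly the inputs where Python A raises IndexError: the empty matrix (the width
-- lookup A[0] fails), or a row too short for the diagonal/superdiagonal access the loop performs there.
def Pre_u_bidiag (A : List (List Int)) : Prop :=
  A ≠ [] ∧ ∀ i < A.length,
    (i < (A.headD []).length → i < (A.getD i []).length) ∧
    (i + 1 < (A.headD []).length → i + 1 < (A.getD i []).length)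
instance (A : List (List Int)) : Decidable (Pre_u_bidiag A) := by unfold Pre_u_bidiag; infer_instance

def pvWitness_u_bidiag : List (List Int) := [[1, 2, 3], [4, 5, 6], [7, 8, 9]]

def Spec_u_bidiag (A : List (List Int)) (out : List (List Int)) : Prop := out = u_bidiag_alt A
instance (A : List (List Int)) (out : List (List Int)) : Decidable (Spec_u_bidiag A out) := by unfold Spec_u_bidiag; infer_instance

-- ===== CLAIM (what is proved, stated in full; the proofs are below) =====
def Claim_equal_u_bidiag : Prop := ∀ (A : List (List Int)), Dom_u_bidiag A → Pre_u_bidiag A → Spec_u_bidiag A (u_bidiag A)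

-- ===== LEMMAS AND PROOFS =====

-- the two row builders agree on every row index admitted by Pre_
theorem u_bidiag_row_eq (A : List (List Int)) (k : Nat) (hk : k < A.length)
    (h1 : k < (A.headD []).length → k < (A.getD k []).length)
    (h2 : k + 1 < (A.headD []).length → k + 1 < (A.getD k []).length) :
    (List.range (A.headD []).length).map (fun j =>
      if k = j then (A.getD k []).getD j 0
      else if k + 1 = j then (A.getD k []).getD j 0
      else 0) =
    (if ((A.headD []).length : Int) ≤ (k : Int) then
        List.replicate (A.headD []).length (0 : Int)
     else
        let seg := PySem.List.slice (PySem.List.slice (A.getD k []) (some (k : Int))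
          (some ((k : Int) + 2))) none (some (((A.headD []).length : Int) - (k : Int)))
        List.replicate (k : Int).toNat (0 : Int) ++ seg ++
          List.replicate ((A.headD []).length - (k : Int).toNat - seg.length) 0) := by
  set p := (A.headD []).length with hp
  set row := A.getD k [] with hrow
  by_cases hkp : p ≤ k
  · -- all-zero row on both sides
    simp only [if_pos (show (p : Int) ≤ (k : Int) by exact_mod_cast hkp)]
    apply List.ext_getElem
    · simp
    · intro j hj _
      have hjp : j < p := by simpa using hj
      simp only [List.getElem_map, List.getElem_range, List.getElem_replicate]
      have : ¬ (k = j) := by omega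
      have : ¬ (k + 1 = j) := by omega
      simp_all
  · have hkp' : k < p := Nat.lt_of_not_le hkp
    have hklen : k < row.length := h1 hkp'
    simp only [if_neg (show ¬ ((p : Int) ≤ (k : Int)) by exact_mod_cast hkp)]
    -- normalise the slices to drop/take
    have hseg : PySem.List.slice (PySem.List.slice row (some (k : Int))
        (some ((k : Int) + 2))) none (some ((p : Int) - (k : Int))) =
        ((row.drop k).take 2).take (p - k) := by
      have e1 : PySem.List.slice row (some (k : Int)) (some ((k : Int) + ((2 : Nat) : Int))) =
          (row.drop k).take 2 := PySem.List.slice_natCast_add row k 2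
      have e2 : ((p : Int) - (k : Int)) = (((p - k : Nat) : Int)) := by
        push_cast [Nat.cast_sub (Nat.le_of_lt hkp')]; ring
      rw [show ((k : Int) + 2) = ((k : Int) + ((2 : Nat) : Int)) by norm_num, e1, e2,
        PySem.List.slice_to_natCast]
    simp only [hseg]
    set seg := ((row.drop k).take 2).take (p - k) with hsegdef
    have hsegl : seg.length = min (p - k) (min 2 (row.length - k)) := by
      simp [hsegdef]
    have hsegle : seg.length ≤ p - k := by omega
    apply List.ext_getElem
    · simp only [List.length_map, List.length_range, List.length_append,
        List.length_replicate, Int.toNat_natCast]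
      omega
    · intro j hj _
      have hjp : j < p := by simpa using hj
      have hseg_get : ∀ (t : Nat) (ht : t < seg.length), seg[t] = row[k + t]'(by omega) := by
        intro t ht
        simp only [hsegdef] at ht ⊢
        simp [List.getElem_take, List.getElem_drop]
      have hgetD : ∀ (t : Nat) (ht : t < row.length), row.getD t 0 = row[t] := by
        intro t ht
        simp [List.getD_eq_getElem?_getD, List.getElem?_eq_getElem ht]
      have hsl1 : 1 ≤ seg.length := by omega
      simp only [List.getElem_map, List.getElem_range, Int.toNat_natCast]
      by_cases hjk : j < k
      · rw [List.getElem_append_left (by simp; omega),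
          List.getElem_append_left (by simpa using hjk), List.getElem_replicate]
        have e1 : ¬ (k = j) := by omega
        have e2 : ¬ (k + 1 = j) := by omega
        simp [e1, e2]
      · by_cases hjs : j < k + seg.length
        · rw [List.getElem_append_left (by simp; omega),
            List.getElem_append_right (by simpa using Nat.le_of_not_lt hjk)]
          simp only [List.length_replicate]
          rcases Nat.eq_or_lt_of_le (Nat.le_of_not_lt hjk) with heq | hgt
          · -- j = k
            have := hseg_get (j - k) (by omega)
            simp only [← heq] at *
            simp_all
          · -- j = k + 1 (seg.length ≤ 2)
            have hjk1 : j = k + 1 := by omega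
            have hkp1 : k + 1 < p := by omega
            have hk1len : k + 1 < row.length := h2 hkp1
            have := hseg_get (j - k) (by omega)
            have e1 : ¬ (k = j) := by omega
            simp_all
        · rw [List.getElem_append_right (by simp; omega), List.getElem_replicate]
          have e1 : ¬ (k = j) := by omega
          have e2 : ¬ (k + 1 = j) := by
            intro h
            have hkp1 : k + 1 < p := by omega
            have hk1len : k + 1 < row.length := h2 hkp1
            omega
          simp [e1, e2]

theorem ports_eq (A : List (List Int)) (hpre : Pre_u_bidiag A) :
    u_bidiag A = u_bidiag_alt A := by
  obtain ⟨-, hrows⟩ := hpre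
  unfold u_bidiag u_bidiag_alt
  apply List.ext_getElem
  · simp [PySem.List.length_enumerate]
  · intro k hk1 hk2
    have hkA : k < A.length := by simpa using hk1
    simp only [List.getElem_map, List.getElem_range, PySem.List.getElem_enumerate]
    have hget : A[k] = A.getD k [] := by
      simp [List.getD_eq_getElem?_getD, List.getElem?_eq_getElem hkA]
    obtain ⟨h1, h2⟩ := hrows k hkA
    have := u_bidiag_row_eq A k hkA h1 h2
    simpa [hget, Int.zero_add] using this

-- ===== VERDICT (by name: the statement is the Claim_ definition above) =====
theorem u_bidiag_spec : Claim_equal_u_bidiag := by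
  intro A _ hpre
  unfold Spec_u_bidiag
  exact ports_eq A hpre
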